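-- pv_equiv track=rewrite | github.com/sweep7125/rulesets | .ci/domainset_ops.py | intersect_pair
-- ===== SOURCE A (Python) =====
-- from typing import List, Tuple, Set, Dict, Iterable
--
-- class _TrieNode:
--     def __init__(self):
--         self.children: Dict[str, "_TrieNode"] = {}
--         self.suffix: bool = False
--         self.full: bool = False
--
-- def _labels_rev(base: str) -> List[str]:
--     return base.split(".")[::-1] if base else []
--
-- def _trie_insert(root: _TrieNode, base: str, flag: str) -> None:
--     node = root
--     for lab in _labels_rev(base):
--         node = node.children.setdefault(lab, _TrieNode())
--     if flag == "suffix":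
--         node.suffix = True
--     elif flag == "full":
--         node.full = True
--
-- def _prune(node: _TrieNode, has_suffix_above: bool = False) -> None:
--     if has_suffix_above:
--         node.suffix = False
--         node.full = False
--         for ch in node.children.values():
--             _prune(ch, True)
--         return
--     if node.suffix and node.full:
--         node.full = False
--     next_has_suffix = has_suffix_above or node.suffix
--     for ch in node.children.values():
--         _prune(ch, next_has_suffix)
--
-- def _trie_collect(node: _TrieNode, path_rev: List[str], out_suffix: Set[str], out_full: Set[str]) -> None:
--     base = ".".join(path_rev[::-1]) if path_rev else ""
--     if node.suffix and base:
--         out_suffix.add(base)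
--     if node.full and base:
--         out_full.add(base)
--     for lab, ch in node.children.items():
--         _trie_collect(ch, path_rev + [lab], out_suffix, out_full)
--
-- def optimize_suffix_full(entries: Iterable[Tuple[str, str]]) -> Tuple[Set[str], Set[str]]:
--     root = _TrieNode()
--     for t, b in entries:
--         if b:
--             _trie_insert(root, b, t)
--     _prune(root, False)
--     S: Set[str] = set()
--     E: Set[str] = set()
--     _trie_collect(root, [], S, E)
--     return S, E
--
-- def is_under(a: str, b: str) -> bool:
--     if a == b:
--         return True
--     return a.endswith("." + b)
--
-- def intersect_pair(A_suffix: Set[str], A_full: Set[str],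
--                    B_suffix: Set[str], B_full: Set[str]) -> Tuple[Set[str], Set[str]]:
--     out_suf: Set[str] = set()
--     out_full: Set[str] = set()
--
--     As, Bs = (A_suffix, B_suffix) if len(A_suffix) <= len(B_suffix) else (B_suffix, A_suffix)
--     for sr in As:
--         for sc in Bs:
--             if is_under(sr, sc):
--                 out_suf.add(sr)
--             elif is_under(sc, sr):
--                 out_suf.add(sc)
--
--     for fr in A_full:
--         if fr in B_full or any(is_under(fr, sc) for sc in B_suffix):
--             out_full.add(fr)
--
--     for fc in B_full:
--         if fc in A_full or any(is_under(fc, sr) for sr in A_suffix):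
--             out_full.add(fc)
--
--     return optimize_suffix_full([("suffix", s) for s in out_suf] + [("full", e) for e in out_full])
-- ===== SOURCE B (Python) =====
-- def intersect_pair(A_suffix, A_full, B_suffix, B_full):
--     # One pass per element: enumerate each domain's label-suffixes ("ancestors")
--     # and test membership in the other side's set, instead of A's pairwise scans
--     # and trie rebuild.
--     def ancestors(s):
--         labs = s.split(".")
--         return [".".join(labs[k:]) for k in range(len(labs))]
--
--     def hits(s, other):
--         return any(a in other for a in ancestors(s))
--
--     out_suf = ({s for s in A_suffix if s and hits(s, B_suffix)}
--                | {s for s in B_suffix if s and hits(s, A_suffix)})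
--     out_full = ({f for f in A_full if f and (f in B_full or hits(f, B_suffix))}
--                 | {f for f in B_full if f and (f in A_full or hits(f, A_suffix))})
--
--     S = {s for s in out_suf if not any(a in out_suf for a in ancestors(s)[1:])}
--     E = {f for f in out_full
--          if f not in out_suf and not any(a in out_suf for a in ancestors(f)[1:])}
--     return S, E
-- ===== Notes on version B (the rewrite author's own statement) =====
-- stated objective: faster
-- what changed: A intersects the suffix sets by an O(|A|*|B|) pairwise nesting scan and per-full-entry linear scans, then rebuilds and prunes a trie; B does one pass per element, enumerating its label-suffixes and testing set membership in the other side (and in the combined suffix set for the pruning step), with no pairwise loop and no trie.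
import Mathlib
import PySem

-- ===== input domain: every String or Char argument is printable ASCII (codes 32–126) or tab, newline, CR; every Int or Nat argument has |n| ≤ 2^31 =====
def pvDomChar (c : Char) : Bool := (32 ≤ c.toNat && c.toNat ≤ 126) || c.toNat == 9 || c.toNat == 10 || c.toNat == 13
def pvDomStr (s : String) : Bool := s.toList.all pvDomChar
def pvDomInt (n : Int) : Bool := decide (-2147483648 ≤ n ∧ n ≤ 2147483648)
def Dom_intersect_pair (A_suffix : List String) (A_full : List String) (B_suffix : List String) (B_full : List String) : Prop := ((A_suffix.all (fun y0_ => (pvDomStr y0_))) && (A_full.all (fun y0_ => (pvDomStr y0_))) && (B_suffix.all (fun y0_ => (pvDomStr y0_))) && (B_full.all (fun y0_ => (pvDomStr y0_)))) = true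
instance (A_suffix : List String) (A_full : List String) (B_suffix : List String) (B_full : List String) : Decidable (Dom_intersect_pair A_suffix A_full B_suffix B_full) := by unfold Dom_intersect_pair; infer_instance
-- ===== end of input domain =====

-- B replaces A's pairwise suffix-nesting scans and trie rebuild by per-element
-- label-suffix enumeration with set-membership tests (objective: faster).
-- Both Pythons RETURN SETS; the ports represent each returned set by its
-- canonically sorted element list (canonSet), since Python set iteration order
-- is unspecified.  All intermediate sets are PySem.Sets in insertion order.

-- ===== PORT A =====

-- shared with port B: Python's s.split(".") (sep ≠ "" so split? is `some`)
def splitDot (s : String) : List String := (PySem.Str.split? s ".").getD []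

-- shared with port B: the canonical list representation of a returned set
def canonSet (l : List String) : List String := PySem.List.sorted l (fun x => x) false

def isUnder (a b : String) : Bool := a == b || PySem.Str.endswith a ("." ++ b)

def labelsRev (base : String) : List String :=
  if base ≠ "" then (splitDot base).reverse else []

mutual
inductive Trie where
  | mk : Bool → Bool → TrieC → Trie
inductive TrieC where
  | nil : TrieC
  | cons : String → Trie → TrieC → TrieC
end

def emptyTrie : Trie := Trie.mk false false TrieC.nil

-- _trie_insert: walk/extend the child chain along the labels, set the flag at the end
mutual
def trieInsert : Trie → List String → String → Trie
  | Trie.mk s f c, [], flag =>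
      if flag == "suffix" then Trie.mk true f c
      else if flag == "full" then Trie.mk s true c
      else Trie.mk s f c
  | Trie.mk s f c, l :: ls, flag => Trie.mk s f (childInsert c l ls flag)
def childInsert : TrieC → String → List String → String → TrieC
  | TrieC.nil, l, ls, flag => TrieC.cons l (trieInsert emptyTrie ls flag) TrieC.nil
  | TrieC.cons l' t rest, l, ls, flag =>
      if l' == l then TrieC.cons l' (trieInsert t ls flag) rest
      else TrieC.cons l' t (childInsert rest l ls flag)
end

-- _prune
mutual
def prune : Trie → Bool → Trie
  | Trie.mk s f c, hasAbove =>
      if hasAbove then Trie.mk false false (pruneC c true)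
      else Trie.mk s (if s && f then false else f) (pruneC c (hasAbove || s))
def pruneC : TrieC → Bool → TrieC
  | TrieC.nil, _ => TrieC.nil
  | TrieC.cons l t rest, ha => TrieC.cons l (prune t ha) (pruneC rest ha)
end

-- _trie_collect (the two result sets threaded as an accumulator pair)
mutual
def collect : Trie → List String → List String × List String → List String × List String
  | Trie.mk s f c, pathRev, acc =>
      let base := if pathRev ≠ [] then PySem.Str.join "." pathRev.reverse else ""
      let acc1 := if s && base != "" then (PySem.Set.add acc.1 base, acc.2) else acc
      let acc2 := if f && base != "" then (acc1.1, PySem.Set.add acc1.2 base) else acc1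
      collectC c pathRev acc2
def collectC : TrieC → List String → List String × List String → List String × List String
  | TrieC.nil, _, acc => acc
  | TrieC.cons l t rest, pathRev, acc => collectC rest pathRev (collect t (pathRev ++ [l]) acc)
end

-- optimize_suffix_full
def optimize (entries : List (String × String)) : List String × List String :=
  let root := entries.foldl
    (fun r tb => if tb.2 != "" then trieInsert r (labelsRev tb.2) tb.1 else r) emptyTrie
  collect (prune root false) [] ([], [])

def intersect_pair (A_suffix : List String) (A_full : List String) (B_suffix : List String) (B_full : List String) : List String × List String :=
  let AsBs := if A_suffix.length ≤ B_suffix.length then (A_suffix, B_suffix) else (B_suffix, A_suffix)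
  let outSuf : List String := AsBs.1.foldl (fun acc sr => AsBs.2.foldl (fun acc sc =>
      if isUnder sr sc then PySem.Set.add acc sr
      else if isUnder sc sr then PySem.Set.add acc sc
      else acc) acc) []
  let outFull0 : List String := A_full.foldl (fun acc fr =>
      if B_full.contains fr || B_suffix.any (fun sc => isUnder fr sc) then PySem.Set.add acc fr else acc) []
  let outFull : List String := B_full.foldl (fun acc fc =>
      if A_full.contains fc || A_suffix.any (fun sr => isUnder fc sr) then PySem.Set.add acc fc else acc) outFull0
  let res := optimize (outSuf.map (fun s => ("suffix", s)) ++ outFull.map (fun e => ("full", e)))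
  (canonSet res.1, canonSet res.2)

-- ===== PORT B =====

def ancestorsB (s : String) : List String :=
  let labs := splitDot s
  (List.range labs.length).map (fun k => PySem.Str.join "." (labs.drop k))

def hitsB (s : String) (other : List String) : Bool :=
  (ancestorsB s).any (fun a => other.contains a)

def intersect_pair_alt (A_suffix : List String) (A_full : List String) (B_suffix : List String) (B_full : List String) : List String × List String :=
  let outSuf : List String := PySem.Set.union
      (PySem.Set.ofList (A_suffix.filter (fun s => s != "" && hitsB s B_suffix)))
      (B_suffix.filter (fun s => s != "" && hitsB s A_suffix))
  let outFull : List String := PySem.Set.union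
      (PySem.Set.ofList (A_full.filter (fun f => f != "" && (B_full.contains f || hitsB f B_suffix))))
      (B_full.filter (fun f => f != "" && (A_full.contains f || hitsB f A_suffix)))
  let S := outSuf.filter (fun s => !((ancestorsB s).drop 1).any (fun a => outSuf.contains a))
  let E := outFull.filter (fun f => !outSuf.contains f && !((ancestorsB f).drop 1).any (fun a => outSuf.contains a))
  (canonSet S, canonSet E)

-- ===== PRECONDITION & SPEC =====
def Spec_intersect_pair (A_suffix : List String) (A_full : List String) (B_suffix : List String) (B_full : List String) (out : List String × List String) : Prop := out = intersect_pair_alt A_suffix A_full B_suffix B_full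
instance (A_suffix : List String) (A_full : List String) (B_suffix : List String) (B_full : List String) (out : List String × List String) : Decidable (Spec_intersect_pair A_suffix A_full B_suffix B_full out) := by unfold Spec_intersect_pair; infer_instance

-- ===== CLAIM (what is proved, stated in full; the proofs are below) =====
def Claim_equal_intersect_pair : Prop := ∀ (A_suffix : List String) (A_full : List String) (B_suffix : List String) (B_full : List String), Dom_intersect_pair A_suffix A_full B_suffix B_full → Spec_intersect_pair A_suffix A_full B_suffix B_full (intersect_pair A_suffix A_full B_suffix B_full)

-- ===== LEMMAS AND PROOFS =====

-- ---------- string layer ----------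
theorem modifyHead_funid (l : List (List Char)) : List.modifyHead (fun h : List Char => h) l = l := by
  cases l <;> rfl

theorem splitOn_go_spec (fuel : Nat) : ∀ (l cur : List Char) (acc : List (List Char)),
    l.length < fuel →
    PySem.Chars.splitOn.go ['.'] fuel l cur acc
      = acc.reverse ++ (l.splitOn '.').modifyHead (fun h => cur.reverse ++ h) := by
  induction fuel with
  | zero => intro l cur acc h; omega
  | succ fuel ih =>
    intro l cur acc h
    cases l with
    | nil =>
      rw [PySem.Chars.splitOn.go.eq_def]
      simp [List.splitOn_nil]
    | cons c rest =>
      rw [PySem.Chars.splitOn.go.eq_def]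
      by_cases hc : c = '.'
      · subst hc
        have hpre : (['.'] : List Char).isPrefixOf ('.' :: rest) = true := by simp [List.isPrefixOf]
        simp only [hpre, if_pos]
        rw [ih _ _ _ (by simpa using Nat.lt_of_succ_lt_succ h)]
        simp [List.splitOn, List.splitOnP_cons, modifyHead_funid]
      · have hpre : (['.'] : List Char).isPrefixOf (c :: rest) = false := by
          simp only [List.isPrefixOf, List.isPrefixOf_nil_left, Bool.and_true, beq_eq_false_iff_ne, ne_eq]
          exact fun h => hc h.symm
        simp only [hpre]
        rw [if_neg (by simp [eq_comm, hc])]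
        rw [ih _ _ _ (by simpa using Nat.lt_of_succ_lt_succ h)]
        simp only [List.splitOn, List.splitOnP_cons]
        rw [if_neg (by simp [hc])]
        obtain ⟨h0, t0, he⟩ : ∃ h0 t0, rest.splitOnP (· == '.') = h0 :: t0 := by
          rcases e : rest.splitOnP (· == '.') with _ | ⟨h0, t0⟩
          · exact absurd e (List.splitOnP_ne_nil _ _)
          · exact ⟨h0, t0, rfl⟩
        simp [he, List.modifyHead]

theorem splitOn_bridge (cs : List Char) : PySem.Chars.splitOn cs ['.'] = cs.splitOn '.' := by
  have := splitOn_go_spec (cs.length + 1) cs [] [] (by omega)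
  simpa [PySem.Chars.splitOn, modifyHead_funid] using this

-- splitDot/joinDot abbreviations used by the proofs
def joinDot (parts : List String) : String := PySem.Str.join "." parts

theorem splitDot_eq (s : String) : splitDot s = (s.toList.splitOn '.').map String.ofList := by
  simp [splitDot, PySem.Str.split?, PySem.Chars.split?, splitOn_bridge,
    show (".".toList) = ['.'] from rfl]

theorem toList_joinDot (parts : List String) :
    (joinDot parts).toList = ['.'].intercalate (parts.map String.toList) := by
  simp [joinDot, PySem.Str.toList_join, PySem.Chars.join, show (".".toList) = ['.'] from rfl]

theorem joinDot_splitDot (s : String) : joinDot (splitDot s) = s := by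
  rw [← String.toList_inj, toList_joinDot, splitDot_eq]
  simp only [List.map_map]
  have : (String.toList ∘ String.ofList) = id := by funext l; simp
  rw [this, List.map_id, List.intercalate_splitOn]

theorem splitDot_ne_nil (s : String) : splitDot s ≠ [] := by
  rw [splitDot_eq]
  simp [List.splitOn, List.splitOnP_ne_nil]

theorem dot_not_mem_splitOn (cs : List Char) : ∀ p ∈ cs.splitOn '.', '.' ∉ p := by
  induction cs with
  | nil => simp [List.splitOn_nil]
  | cons c rest ih =>
    intro p hp
    simp only [List.splitOn, List.splitOnP_cons] at hp ih
    by_cases hc : c = '.'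
    · subst hc; simp at hp
      rcases hp with h | h
      · simp [h]
      · exact ih p h
    · rw [if_neg (by simp [hc])] at hp
      rcases e : rest.splitOnP (· == '.') with _ | ⟨h0, t0⟩
      · exact absurd e (List.splitOnP_ne_nil _ _)
      · rw [e] at hp ih
        simp [List.modifyHead] at hp
        rcases hp with h | h
        · subst h; intro hmem
          rcases List.mem_cons.mp hmem with h | h
          · exact hc h.symm
          · exact ih h0 (by simp) h
        · exact ih p (by simp [h])

theorem dotfree_splitDot (s : String) : ∀ x ∈ splitDot s, '.' ∉ x.toList := by
  rw [splitDot_eq]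
  intro x hx
  rcases List.mem_map.mp hx with ⟨p, hp, rfl⟩
  simpa using dot_not_mem_splitOn s.toList p hp

theorem splitDot_joinDot (parts : List String) (hne : parts ≠ [])
    (hdf : ∀ x ∈ parts, '.' ∉ x.toList) : splitDot (joinDot parts) = parts := by
  rw [splitDot_eq, toList_joinDot]
  rw [List.splitOn_intercalate (x := '.') (hx := by
      intro l hl
      rcases List.mem_map.mp hl with ⟨x, hx, rfl⟩
      exact hdf x hx) (hls := by simpa using hne)]
  simp only [List.map_map]
  have : (String.ofList ∘ String.toList) = id := by funext l; simp
  rw [this, List.map_id]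

-- a '.'-suffix of a joined dot-free list is exactly a join of a proper tail
theorem core_suffix (pieces : List (List Char)) (hne : pieces ≠ [])
    (hdf : ∀ p ∈ pieces, '.' ∉ p) (bs : List Char) :
    ('.' :: bs) <:+ PySem.Chars.join ['.'] pieces
      ↔ ∃ k, 0 < k ∧ k < pieces.length ∧ bs = PySem.Chars.join ['.'] (pieces.drop k) := by
  induction pieces with
  | nil => exact absurd rfl hne
  | cons p rest ih =>
    cases rest with
    | nil =>
      simp only [PySem.Chars.join_singleton]
      constructor
      · intro hsuf
        exact absurd (hsuf.mem (by simp)) (hdf p (by simp))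
      · rintro ⟨k, hk0, hk1, -⟩
        simp at hk1; omega
    | cons q rest' =>
      rw [PySem.Chars.join_cons_cons]
      have hdfp : '.' ∉ p := hdf p (by simp)
      have ihq := ih (by simp) (fun x hx => hdf x (by simp [hx]))
      constructor
      · rintro ⟨u, hu⟩
        -- u ++ '.'::bs = p ++ ('.' :: join (q::rest'))
        have hu' : u ++ '.' :: bs = p ++ ('.' :: PySem.Chars.join ['.'] (q :: rest')) := by
          simpa using hu
        rcases List.append_eq_append_iff.mp hu' with ⟨as, has1, has2⟩ | ⟨cs, hcs1, hcs2⟩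
        · -- p = u ++ as, '.'::bs = as ++ '.'::join
          cases as with
          | nil =>
            simp at has2
            exact ⟨1, by omega, by simp, by simpa using has2⟩
          | cons a as' =>
            have ha : a = '.' := by simpa using congrArg (·.head?) has2.symm
            exact absurd (by simp [has1, ha] : '.' ∈ p) hdfp
        · -- u = p ++ cs, '.'::join = cs ++ '.'::bs
          cases cs with
          | nil =>
            simp at hcs2
            exact ⟨1, by omega, by simp, by simpa using hcs2.symm⟩
          | cons c cs' =>
            have hc : '.' = c := by simpa using congrArg (·.head?) hcs2
            subst hc
            have : PySem.Chars.join ['.'] (q :: rest') = cs' ++ '.' :: bs := by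
              simpa using hcs2
            have hsuf : ('.' :: bs) <:+ PySem.Chars.join ['.'] (q :: rest') :=
              ⟨cs', this.symm⟩
            rcases ihq.mp hsuf with ⟨k, hk0, hk1, hbs⟩
            exact ⟨k + 1, by omega, by simpa using Nat.succ_lt_succ hk1, by simpa using hbs⟩
      · rintro ⟨k, hk0, hk1, hbs⟩
        cases k with
        | zero => omega
        | succ k' =>
          simp only [List.drop_succ_cons] at hbs
          rcases Nat.eq_zero_or_pos k' with hz | hpos
          · subst hz
            simp only [List.drop_zero] at hbs
            subst hbs
            exact ⟨p, by simp⟩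
          · have hk1' : k' < (q :: rest').length := by simpa using Nat.lt_of_succ_lt_succ hk1
            have hsuf : ('.' :: bs) <:+ PySem.Chars.join ['.'] (q :: rest') :=
              ihq.mpr ⟨k', hpos, hk1', hbs⟩
            exact hsuf.trans (List.suffix_append _ _)


theorem isUnder_iff (a b : String) :
    isUnder a b = true ↔ ∃ k, k < (splitDot a).length ∧ b = joinDot ((splitDot a).drop k) := by
  have hendsw : PySem.Str.endswith a ("." ++ b) = true ↔ ('.' :: b.toList) <:+ a.toList := by
    rw [show PySem.Str.endswith a ("." ++ b) = PySem.Chars.endswith a.toList ("." ++ b).toList by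
        simp]
    rw [PySem.Chars.endswith_iff]
    simp
  have hjoin : a.toList = PySem.Chars.join ['.'] ((splitDot a).map String.toList) := by
    have := toList_joinDot (splitDot a)
    rw [joinDot_splitDot] at this
    simpa [PySem.Chars.join] using this
  have hdf : ∀ p ∈ (splitDot a).map String.toList, '.' ∉ p := by
    intro p hp
    rcases List.mem_map.mp hp with ⟨x, hx, rfl⟩
    exact dotfree_splitDot a x hx
  constructor
  · intro h
    rcases Bool.or_eq_true _ _ |>.mp h with h | h
    · exact ⟨0, by
        have := splitDot_ne_nil a
        cases e : splitDot a with
        | nil => exact absurd e this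
        | cons x xs => simp, by simpa [joinDot_splitDot] using (beq_iff_eq.mp h).symm⟩
    · have := hendsw.mp h
      rw [hjoin] at this
      rcases (core_suffix _ (by simpa using splitDot_ne_nil a) hdf _).mp this with ⟨k, hk0, hk1, hbs⟩
      refine ⟨k, by simpa using hk1, ?_⟩
      rw [← String.toList_inj, toList_joinDot]
      simpa [PySem.Chars.join, List.map_drop] using hbs
  · rintro ⟨k, hk, rfl⟩
    rcases Nat.eq_zero_or_pos k with hz | hpos
    · subst hz
      simp [isUnder, joinDot_splitDot]
    · apply Bool.or_eq_true _ _ |>.mpr; right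
      apply hendsw.mpr
      rw [hjoin]
      apply (core_suffix _ (by simpa using splitDot_ne_nil a) hdf _).mpr
      refine ⟨k, hpos, by simpa using hk, ?_⟩
      rw [toList_joinDot]
      simp [PySem.Chars.join, List.map_drop]

theorem isUnder_refl (a : String) : isUnder a a = true := by simp [isUnder]

theorem isUnder_antisymm {a b : String} (h1 : isUnder a b = true) (h2 : isUnder b a = true) :
    a = b := by
  rcases Bool.or_eq_true _ _ |>.mp h1 with h | h
  · exact beq_iff_eq.mp h
  · rcases Bool.or_eq_true _ _ |>.mp h2 with h' | h'
    · exact (beq_iff_eq.mp h').symm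
    · exfalso
      have s1 : ('.' :: b.toList) <:+ a.toList := by
        have : PySem.Chars.endswith a.toList ("." ++ b).toList = true := by simpa using h
        rw [PySem.Chars.endswith_iff] at this; simpa using this
      have s2 : ('.' :: a.toList) <:+ b.toList := by
        have : PySem.Chars.endswith b.toList ("." ++ a).toList = true := by simpa using h'
        rw [PySem.Chars.endswith_iff] at this; simpa using this
      have l1 := s1.length_le
      have l2 := s2.length_le
      simp at l1 l2; omega



-- ---------- trie layer ----------

def childGet? : TrieC → String → Option Trie
  | TrieC.nil, _ => none
  | TrieC.cons l t rest, m => if l = m then some t else childGet? rest m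

mutual
def flagS : Trie → List String → Bool
  | Trie.mk s _ _, [] => s
  | Trie.mk _ _ c, l :: ls => flagSC c l ls
def flagSC : TrieC → String → List String → Bool
  | TrieC.nil, _, _ => false
  | TrieC.cons l' t rest, l, ls => if l' = l then flagS t ls else flagSC rest l ls
end

mutual
def flagF : Trie → List String → Bool
  | Trie.mk _ f _, [] => f
  | Trie.mk _ _ c, l :: ls => flagFC c l ls
def flagFC : TrieC → String → List String → Bool
  | TrieC.nil, _, _ => false
  | TrieC.cons l' t rest, l, ls => if l' = l then flagF t ls else flagFC rest l ls
end

mutual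
def strictAbove : Trie → List String → Bool
  | _, [] => false
  | Trie.mk s _ c, l :: ls => s || strictAboveC c l ls
def strictAboveC : TrieC → String → List String → Bool
  | TrieC.nil, _, _ => false
  | TrieC.cons l' t rest, l, ls => if l' = l then strictAbove t ls else strictAboveC rest l ls
end

def labelsC : TrieC → List String
  | TrieC.nil => []
  | TrieC.cons l _ rest => l :: labelsC rest

mutual
def wfT : Trie → Prop
  | Trie.mk _ _ c => wfC c
def wfC : TrieC → Prop
  | TrieC.nil => True
  | TrieC.cons l t rest => l ∉ labelsC rest ∧ wfT t ∧ wfC rest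
end

theorem flagSC_eq (c : TrieC) (l : String) (ls : List String) :
    flagSC c l ls = (childGet? c l).elim false (fun t => flagS t ls) := by
  cases c with
  | nil => rfl
  | cons l' t rest =>
    by_cases h : l' = l <;> simp [flagSC, childGet?, h, flagSC_eq rest l ls]

theorem flagFC_eq (c : TrieC) (l : String) (ls : List String) :
    flagFC c l ls = (childGet? c l).elim false (fun t => flagF t ls) := by
  cases c with
  | nil => rfl
  | cons l' t rest =>
    by_cases h : l' = l <;> simp [flagFC, childGet?, h, flagFC_eq rest l ls]

theorem strictAboveC_eq (c : TrieC) (l : String) (ls : List String) :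
    strictAboveC c l ls = (childGet? c l).elim false (fun t => strictAbove t ls) := by
  cases c with
  | nil => rfl
  | cons l' t rest =>
    by_cases h : l' = l <;> simp [strictAboveC, childGet?, h, strictAboveC_eq rest l ls]

theorem flagS_empty (q : List String) : flagS emptyTrie q = false := by
  cases q <;> rfl

theorem flagF_empty (q : List String) : flagF emptyTrie q = false := by
  cases q <;> rfl

theorem childGet?_childInsert (c : TrieC) (l : String) (ls : List String) (fl m : String) :
    childGet? (childInsert c l ls fl) m
      = if m = l then some (trieInsert ((childGet? c l).getD emptyTrie) ls fl)
        else childGet? c m := by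
  cases c with
  | nil =>
    by_cases h : m = l
    · simp [childInsert, childGet?, h]
    · simp [childInsert, childGet?, h]
      intro h'; exact absurd h'.symm h
  | cons l' t rest =>
    by_cases h1 : l' = l
    · subst h1
      by_cases h2 : l' = m
      · subst h2
        simp [childInsert, childGet?, beq_iff_eq]
      · simp [childInsert, childGet?, beq_iff_eq, h2]
        intro h'; exact absurd h'.symm h2
    · have hne : (l' == l) = false := by simp [h1]
      by_cases h2 : l' = m
      · simp [childInsert, childGet?, hne, h2,
          show ¬ m = l from fun hh => h1 (h2.trans hh)]
      · simp [childInsert, childGet?, hne, h1, h2, childGet?_childInsert rest l ls fl m]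

theorem flagS_trieInsert (p : List String) : ∀ (t : Trie) (q : List String) (fl : String),
    flagS (trieInsert t p fl) q = (flagS t q || (fl == "suffix" && decide (q = p))) := by
  induction p with
  | nil =>
    rintro ⟨s, f, c⟩ q fl
    by_cases hfl : fl = "suffix"
    · subst hfl
      cases q <;> simp [trieInsert, flagS]
    · have hne : (fl == "suffix") = false := by simp [hfl]
      by_cases hfl2 : fl = "full"
      · subst hfl2; cases q <;> simp [trieInsert, flagS]
      · cases q <;> simp [trieInsert, flagS, hfl, hfl2, hne]
  | cons l ls ih =>
    rintro ⟨s, f, c⟩ q fl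
    cases q with
    | nil => simp [trieInsert, flagS]
    | cons m ms =>
      simp only [trieInsert, flagS, flagSC_eq, childGet?_childInsert]
      by_cases h : m = l
      · subst h
        rw [if_pos rfl, Option.elim_some, ih]
        rcases e : childGet? c m with _ | t0
        · simp [e, flagS_empty, List.cons.injEq]
        · simp [e, List.cons.injEq]
      · rw [if_neg h]
        have hd : decide (m :: ms = l :: ls) = false := by simp [h]
        simp only [hd, Bool.and_false, Bool.or_false, flagS, flagSC_eq]

theorem flagF_trieInsert (p : List String) : ∀ (t : Trie) (q : List String) (fl : String),
    flagF (trieInsert t p fl) q = (flagF t q || (fl == "full" && decide (q = p))) := by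
  induction p with
  | nil =>
    rintro ⟨s, f, c⟩ q fl
    by_cases hfl : fl = "suffix"
    · subst hfl
      cases q <;> simp [trieInsert, flagF]
    · have hne : (fl == "suffix") = false := by simp [hfl]
      by_cases hfl2 : fl = "full"
      · subst hfl2; cases q <;> simp [trieInsert, flagF, hne]
      · cases q <;> simp [trieInsert, flagF, hfl, hfl2, hne]
  | cons l ls ih =>
    rintro ⟨s, f, c⟩ q fl
    cases q with
    | nil => simp [trieInsert, flagF]
    | cons m ms =>
      simp only [trieInsert, flagF, flagFC_eq, childGet?_childInsert]
      by_cases h : m = l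
      · subst h
        rw [if_pos rfl, Option.elim_some, ih]
        rcases e : childGet? c m with _ | t0
        · simp [e, flagF_empty, List.cons.injEq]
        · simp [e, List.cons.injEq]
      · rw [if_neg h]
        have hd : decide (m :: ms = l :: ls) = false := by simp [h]
        simp only [hd, Bool.and_false, Bool.or_false, flagF, flagFC_eq]


theorem wfT_empty : wfT emptyTrie := by trivial

theorem childInsert_wf_aux (l : String) (ls : List String) (fl : String)
    (hins : ∀ t, wfT t → wfT (trieInsert t ls fl)) :
    ∀ (c : TrieC), wfC c →
      wfC (childInsert c l ls fl) ∧
        (∀ m, m ∈ labelsC (childInsert c l ls fl) → m ∈ labelsC c ∨ m = l)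
  | TrieC.nil, _ => by
    constructor
    · simp only [childInsert, wfC, labelsC]
      exact ⟨by simp, hins emptyTrie wfT_empty, trivial⟩
    · simp [childInsert, labelsC]
  | TrieC.cons l' t rest, hw => by
    rcases hw with ⟨hnl, hwt, hwr⟩
    by_cases h : l' = l
    · subst h
      constructor
      · simp only [childInsert, beq_self_eq_true, if_true, wfC]
        exact ⟨hnl, hins t hwt, hwr⟩
      · simp only [childInsert, beq_self_eq_true, if_true, labelsC]
        intro m hm; exact Or.inl hm
    · have hne : (l' == l) = false := by simp [h]
      rcases childInsert_wf_aux l ls fl hins rest hwr with ⟨hw1, hsub⟩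
      constructor
      · simp only [childInsert, hne, Bool.false_eq_true, if_false, wfC]
        refine ⟨?_, hwt, hw1⟩
        intro hmem
        rcases hsub l' hmem with hin | heq
        · exact hnl hin
        · exact h heq
      · simp only [childInsert, hne, Bool.false_eq_true, if_false, labelsC]
        intro m hm
        rcases List.mem_cons.mp hm with rfl | hm'
        · exact Or.inl (by simp [labelsC])
        · rcases hsub m hm' with hin | heq
          · exact Or.inl (by simp [labelsC, hin])
          · exact Or.inr heq

theorem wf_trieInsert (p : List String) : ∀ (t : Trie) (fl : String), wfT t → wfT (trieInsert t p fl) := by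
  induction p with
  | nil =>
    rintro ⟨s, f, c⟩ fl hw
    by_cases h1 : fl = "suffix"
    · simpa [trieInsert, h1, wfT] using hw
    · by_cases h2 : fl = "full" <;> simpa [trieInsert, h1, h2, wfT] using hw
  | cons l ls ih =>
    rintro ⟨s, f, c⟩ fl hw
    simp only [trieInsert, wfT]
    exact (childInsert_wf_aux l ls fl (fun t => ih t fl) c hw).1

theorem labelsC_pruneC (c : TrieC) (h : Bool) : labelsC (pruneC c h) = labelsC c := by
  cases c with
  | nil => rfl
  | cons l t rest => simp [pruneC, labelsC, labelsC_pruneC rest h]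

mutual
theorem wf_prune : ∀ (t : Trie) (h : Bool), wfT t → wfT (prune t h)
  | Trie.mk s f c, h, hw => by
    by_cases hh : h <;> simp only [prune, hh, if_pos, if_neg, wfT] <;>
      exact wf_pruneC c _ hw
theorem wf_pruneC : ∀ (c : TrieC) (h : Bool), wfC c → wfC (pruneC c h)
  | TrieC.nil, _, _ => trivial
  | TrieC.cons l t rest, h, hw => by
    rcases hw with ⟨hnl, hwt, hwr⟩
    exact ⟨by rwa [labelsC_pruneC], wf_prune t h hwt, wf_pruneC rest h hwr⟩
end

theorem childGet?_pruneC (c : TrieC) (h : Bool) (m : String) :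
    childGet? (pruneC c h) m = (childGet? c m).map (fun t => prune t h) := by
  cases c with
  | nil => rfl
  | cons l t rest =>
    by_cases hm : l = m <;> simp [pruneC, childGet?, hm, childGet?_pruneC rest h m]

theorem strictAbove_iff (q : List String) : ∀ (t : Trie),
    strictAbove t q = true ↔ ∃ k, k < q.length ∧ flagS t (q.take k) = true := by
  induction q with
  | nil => intro t; simp [strictAbove]
  | cons l ls ih =>
    rintro ⟨s, f, c⟩
    simp only [strictAbove, Bool.or_eq_true, strictAboveC_eq]
    constructor
    · rintro (hs | hrest)
      · exact ⟨0, by simp, by simpa [flagS] using hs⟩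
      · rcases e : childGet? c l with _ | t0
        · simp [e] at hrest
        · rw [e] at hrest
          simp only [Option.elim_some] at hrest
          rcases (ih t0).mp hrest with ⟨k, hk, hf⟩
          refine ⟨k + 1, by simpa using hk, ?_⟩
          simpa [flagS, flagSC_eq, e] using hf
    · rintro ⟨k, hk, hf⟩
      cases k with
      | zero => exact Or.inl (by simpa [flagS] using hf)
      | succ k' =>
        right
        simp only [List.take_succ_cons, flagS, flagSC_eq] at hf
        rcases e : childGet? c l with _ | t0
        · rw [e] at hf; simp at hf
        · rw [e] at hf
          simp only [Option.elim_some] at hf ⊢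
          exact (ih t0).mpr ⟨k', by simpa using hk, hf⟩

theorem flagS_prune (q : List String) : ∀ (t : Trie) (ha : Bool),
    flagS (prune t ha) q = (!ha && flagS t q && !strictAbove t q) := by
  induction q with
  | nil =>
    rintro ⟨s, f, c⟩ ha
    by_cases hh : ha <;> simp [prune, hh, flagS, strictAbove]
  | cons l ls ih =>
    rintro ⟨s, f, c⟩ ha
    have hstep : flagS (prune (Trie.mk s f c) ha) (l :: ls)
        = flagSC (pruneC c (ha || s)) l ls := by
      by_cases hh : ha <;> simp [prune, hh, flagS]
    rw [hstep]
    simp only [flagS, flagSC_eq, childGet?_pruneC, strictAbove, strictAboveC_eq]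
    rcases e : childGet? c l with _ | t0
    · simp
    · simp only [Option.map_some, Option.elim_some, ih t0 (ha || s)]
      cases ha <;> cases s <;> cases flagS t0 ls <;> cases strictAbove t0 ls <;> simp

theorem flagF_prune (q : List String) : ∀ (t : Trie) (ha : Bool),
    flagF (prune t ha) q = (!ha && flagF t q && !flagS t q && !strictAbove t q) := by
  induction q with
  | nil =>
    rintro ⟨s, f, c⟩ ha
    by_cases hh : ha <;> cases s <;> cases f <;> simp [prune, hh, flagS, flagF, strictAbove]
  | cons l ls ih =>
    rintro ⟨s, f, c⟩ ha
    have hstep : flagF (prune (Trie.mk s f c) ha) (l :: ls)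
        = flagFC (pruneC c (ha || s)) l ls := by
      by_cases hh : ha <;> simp [prune, hh, flagF]
    rw [hstep]
    simp only [flagF, flagS, flagFC_eq, flagSC_eq, childGet?_pruneC, strictAbove, strictAboveC_eq]
    rcases e : childGet? c l with _ | t0
    · simp
    · simp only [Option.map_some, Option.elim_some, ih t0 (ha || s)]
      cases ha <;> cases s <;> cases flagF t0 ls <;> cases flagS t0 ls <;>
        cases strictAbove t0 ls <;> simp


-- the step function of optimize's insert loop, and the base string of a node
def insStep : Trie → String × String → Trie :=
  fun r tb => if tb.2 != "" then trieInsert r (labelsRev tb.2) tb.1 else r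

def baseOf (p : List String) : String :=
  if p ≠ [] then PySem.Str.join "." p.reverse else ""

theorem flagS_foldl (entries : List (String × String)) : ∀ (t : Trie) (q : List String),
    flagS (entries.foldl insStep t) q
      = (flagS t q || entries.any (fun tb =>
          tb.2 != "" && (tb.1 == "suffix" && decide (q = labelsRev tb.2)))) := by
  induction entries with
  | nil => simp
  | cons tb rest ih =>
    intro t q
    rw [List.foldl_cons, ih]
    by_cases h : tb.2 != ""
    · simp only [insStep, h, if_true, flagS_trieInsert, List.any_cons, h, Bool.true_and]
      cases flagS t q <;> cases (tb.1 == "suffix") <;> simp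
    · have h' : (tb.2 != "") = false := by simpa using h
      simp [insStep, h']

theorem flagF_foldl (entries : List (String × String)) : ∀ (t : Trie) (q : List String),
    flagF (entries.foldl insStep t) q
      = (flagF t q || entries.any (fun tb =>
          tb.2 != "" && (tb.1 == "full" && decide (q = labelsRev tb.2)))) := by
  induction entries with
  | nil => simp
  | cons tb rest ih =>
    intro t q
    rw [List.foldl_cons, ih]
    by_cases h : tb.2 != ""
    · simp only [insStep, h, if_true, flagF_trieInsert, List.any_cons, h, Bool.true_and]
      cases flagF t q <;> cases (tb.1 == "full") <;> simp
    · have h' : (tb.2 != "") = false := by simpa using h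
      simp [insStep, h']

theorem wf_foldl (entries : List (String × String)) : ∀ (t : Trie), wfT t →
    wfT (entries.foldl insStep t) := by
  induction entries with
  | nil => intro t h; simpa using h
  | cons tb rest ih =>
    intro t h
    rw [List.foldl_cons]
    apply ih
    by_cases hb : tb.2 != ""
    · simpa [insStep, hb] using wf_trieInsert (labelsRev tb.2) t tb.1 h
    · have h' : (tb.2 != "") = false := by simpa using hb
      simpa [insStep, h'] using h

theorem flagSC_false_of_not_mem (c : TrieC) (l : String) (ls : List String)
    (h : l ∉ labelsC c) : flagSC c l ls = false := by
  cases c with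
  | nil => rfl
  | cons l' t rest =>
    have h1 : l' ≠ l := fun e => h (by simp [labelsC, e])
    simp only [flagSC, if_neg h1]
    exact flagSC_false_of_not_mem rest l ls (fun e => h (by simp [labelsC, e]))

theorem flagFC_false_of_not_mem (c : TrieC) (l : String) (ls : List String)
    (h : l ∉ labelsC c) : flagFC c l ls = false := by
  cases c with
  | nil => rfl
  | cons l' t rest =>
    have h1 : l' ≠ l := fun e => h (by simp [labelsC, e])
    simp only [flagFC, if_neg h1]
    exact flagFC_false_of_not_mem rest l ls (fun e => h (by simp [labelsC, e]))

-- the node-level accumulator update performed by collect before recursing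
def nodeAcc (s f : Bool) (base : String) (acc : List String × List String) :
    List String × List String :=
  let acc1 := if s && base != "" then (PySem.Set.add acc.1 base, acc.2) else acc
  if f && base != "" then (acc1.1, PySem.Set.add acc1.2 base) else acc1

theorem collect_eq (sb fb : Bool) (c : TrieC) (pr : List String)
    (acc : List String × List String) :
    collect (Trie.mk sb fb c) pr acc = collectC c pr (nodeAcc sb fb (baseOf pr) acc) := rfl

theorem mem_nodeAcc_fst (s f : Bool) (b : String) (acc : List String × List String)
    (x : String) :
    x ∈ (nodeAcc s f b acc).1 ↔ x ∈ acc.1 ∨ (s = true ∧ b ≠ "" ∧ x = b) := by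
  unfold nodeAcc
  cases s <;> cases f <;> by_cases hb : b = "" <;>
    simp [hb, PySem.Set.mem_add] <;> tauto

theorem mem_nodeAcc_snd (s f : Bool) (b : String) (acc : List String × List String)
    (x : String) :
    x ∈ (nodeAcc s f b acc).2 ↔ x ∈ acc.2 ∨ (f = true ∧ b ≠ "" ∧ x = b) := by
  unfold nodeAcc
  cases s <;> cases f <;> by_cases hb : b = "" <;>
    simp [hb, PySem.Set.mem_add] <;> tauto

theorem nodup_nodeAcc (s f : Bool) (b : String) (acc : List String × List String)
    (h1 : acc.1.Nodup) (h2 : acc.2.Nodup) :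
    (nodeAcc s f b acc).1.Nodup ∧ (nodeAcc s f b acc).2.Nodup := by
  unfold nodeAcc
  cases s <;> cases f <;> by_cases hb : b = "" <;>
    simp [hb, PySem.Set.nodup_add, h1, h2]

mutual
theorem mem_collect_fst : ∀ (t : Trie) (pr : List String) (acc : List String × List String)
    (x : String), wfT t →
    (x ∈ (collect t pr acc).1
      ↔ x ∈ acc.1 ∨ ∃ q, flagS t q = true ∧ baseOf (pr ++ q) ≠ "" ∧ x = baseOf (pr ++ q))
  | Trie.mk sb fb c, pr, acc, x, hw => by
    rw [collect_eq, mem_collectC_fst c pr _ x hw, mem_nodeAcc_fst]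
    constructor
    · rintro ((hin | ⟨hs, hb, hx⟩) | ⟨l, ls, hf, hb, hx⟩)
      · exact Or.inl hin
      · exact Or.inr ⟨[], by simpa [flagS] using hs, by simpa using hb, by simpa using hx⟩
      · exact Or.inr ⟨l :: ls, by simpa [flagS] using hf, hb, hx⟩
    · rintro (hin | ⟨q, hf, hb, hx⟩)
      · exact Or.inl (Or.inl hin)
      · cases q with
        | nil =>
          exact Or.inl (Or.inr ⟨by simpa [flagS] using hf, by simpa using hb, by simpa using hx⟩)
        | cons l ls =>
          exact Or.inr ⟨l, ls, by simpa [flagS] using hf, hb, hx⟩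
theorem mem_collectC_fst : ∀ (c : TrieC) (pr : List String) (acc : List String × List String)
    (x : String), wfC c →
    (x ∈ (collectC c pr acc).1
      ↔ x ∈ acc.1 ∨ ∃ l ls, flagSC c l ls = true ∧ baseOf (pr ++ l :: ls) ≠ ""
          ∧ x = baseOf (pr ++ l :: ls))
  | TrieC.nil, pr, acc, x, _ => by
    simp [collectC, flagSC]
  | TrieC.cons l t rest, pr, acc, x, hw => by
    rcases hw with ⟨hnl, hwt, hwr⟩
    rw [show collectC (TrieC.cons l t rest) pr acc
        = collectC rest pr (collect t (pr ++ [l]) acc) from rfl]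
    rw [mem_collectC_fst rest pr _ x hwr, mem_collect_fst t (pr ++ [l]) acc x hwt]
    constructor
    · rintro ((hin | ⟨q, hf, hb, hx⟩) | ⟨l', ls', hf, hb, hx⟩)
      · exact Or.inl hin
      · exact Or.inr ⟨l, q, by simp [flagSC, hf], by simpa using hb, by simpa using hx⟩
      · refine Or.inr ⟨l', ls', ?_, hb, hx⟩
        have hne : l ≠ l' := by
          rintro rfl
          rw [flagSC_false_of_not_mem rest l ls' hnl] at hf
          exact Bool.false_ne_true hf
        simpa [flagSC, hne] using hf
    · rintro (hin | ⟨l', ls', hf, hb, hx⟩)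
      · exact Or.inl (Or.inl hin)
      · by_cases he : l = l'
        · subst he
          simp only [flagSC, if_pos rfl] at hf
          exact Or.inl (Or.inr ⟨ls', hf, by simpa using hb, by simpa using hx⟩)
        · right
          refine ⟨l', ls', ?_, hb, hx⟩
          simpa [flagSC, he] using hf
end

mutual
theorem mem_collect_snd : ∀ (t : Trie) (pr : List String) (acc : List String × List String)
    (x : String), wfT t →
    (x ∈ (collect t pr acc).2
      ↔ x ∈ acc.2 ∨ ∃ q, flagF t q = true ∧ baseOf (pr ++ q) ≠ "" ∧ x = baseOf (pr ++ q))
  | Trie.mk sb fb c, pr, acc, x, hw => by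
    rw [collect_eq, mem_collectC_snd c pr _ x hw, mem_nodeAcc_snd]
    constructor
    · rintro ((hin | ⟨hs, hb, hx⟩) | ⟨l, ls, hf, hb, hx⟩)
      · exact Or.inl hin
      · exact Or.inr ⟨[], by simpa [flagF] using hs, by simpa using hb, by simpa using hx⟩
      · exact Or.inr ⟨l :: ls, by simpa [flagF] using hf, hb, hx⟩
    · rintro (hin | ⟨q, hf, hb, hx⟩)
      · exact Or.inl (Or.inl hin)
      · cases q with
        | nil =>
          exact Or.inl (Or.inr ⟨by simpa [flagF] using hf, by simpa using hb, by simpa using hx⟩)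
        | cons l ls =>
          exact Or.inr ⟨l, ls, by simpa [flagF] using hf, hb, hx⟩
theorem mem_collectC_snd : ∀ (c : TrieC) (pr : List String) (acc : List String × List String)
    (x : String), wfC c →
    (x ∈ (collectC c pr acc).2
      ↔ x ∈ acc.2 ∨ ∃ l ls, flagFC c l ls = true ∧ baseOf (pr ++ l :: ls) ≠ ""
          ∧ x = baseOf (pr ++ l :: ls))
  | TrieC.nil, pr, acc, x, _ => by
    simp [collectC, flagFC]
  | TrieC.cons l t rest, pr, acc, x, hw => by
    rcases hw with ⟨hnl, hwt, hwr⟩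
    rw [show collectC (TrieC.cons l t rest) pr acc
        = collectC rest pr (collect t (pr ++ [l]) acc) from rfl]
    rw [mem_collectC_snd rest pr _ x hwr, mem_collect_snd t (pr ++ [l]) acc x hwt]
    constructor
    · rintro ((hin | ⟨q, hf, hb, hx⟩) | ⟨l', ls', hf, hb, hx⟩)
      · exact Or.inl hin
      · exact Or.inr ⟨l, q, by simp [flagFC, hf], by simpa using hb, by simpa using hx⟩
      · refine Or.inr ⟨l', ls', ?_, hb, hx⟩
        have hne : l ≠ l' := by
          rintro rfl
          rw [flagFC_false_of_not_mem rest l ls' hnl] at hf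
          exact Bool.false_ne_true hf
        simpa [flagFC, hne] using hf
    · rintro (hin | ⟨l', ls', hf, hb, hx⟩)
      · exact Or.inl (Or.inl hin)
      · by_cases he : l = l'
        · subst he
          simp only [flagFC, if_pos rfl] at hf
          exact Or.inl (Or.inr ⟨ls', hf, by simpa using hb, by simpa using hx⟩)
        · right
          refine ⟨l', ls', ?_, hb, hx⟩
          simpa [flagFC, he] using hf
end

mutual
theorem nodup_collect : ∀ (t : Trie) (pr : List String) (acc : List String × List String),
    acc.1.Nodup → acc.2.Nodup → (collect t pr acc).1.Nodup ∧ (collect t pr acc).2.Nodup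
  | Trie.mk sb fb c, pr, acc, h1, h2 => by
    rw [collect_eq]
    rcases nodup_nodeAcc sb fb (baseOf pr) acc h1 h2 with ⟨g1, g2⟩
    exact nodup_collectC c pr _ g1 g2
theorem nodup_collectC : ∀ (c : TrieC) (pr : List String) (acc : List String × List String),
    acc.1.Nodup → acc.2.Nodup → (collectC c pr acc).1.Nodup ∧ (collectC c pr acc).2.Nodup
  | TrieC.nil, pr, acc, h1, h2 => ⟨h1, h2⟩
  | TrieC.cons l t rest, pr, acc, h1, h2 => by
    rw [show collectC (TrieC.cons l t rest) pr acc
        = collectC rest pr (collect t (pr ++ [l]) acc) from rfl]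
    rcases nodup_collect t (pr ++ [l]) acc h1 h2 with ⟨g1, g2⟩
    exact nodup_collectC rest pr _ g1 g2
end


-- ---------- characterizations of the two programs ----------

-- proof-side names for A's intermediate values (definitionally the port's expressions)
def outSufA (A_suffix B_suffix : List String) : List String :=
  (if A_suffix.length ≤ B_suffix.length then (A_suffix, B_suffix) else (B_suffix, A_suffix)).1.foldl
    (fun acc sr =>
      (if A_suffix.length ≤ B_suffix.length then (A_suffix, B_suffix) else (B_suffix, A_suffix)).2.foldl
        (fun acc sc =>
          if isUnder sr sc then PySem.Set.add acc sr
          else if isUnder sc sr then PySem.Set.add acc sc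
          else acc) acc) []

def outFullA (A_suffix A_full B_suffix B_full : List String) : List String :=
  B_full.foldl (fun acc fc =>
      if A_full.contains fc || A_suffix.any (fun sr => isUnder fc sr) then PySem.Set.add acc fc
      else acc)
    (A_full.foldl (fun acc fr =>
      if B_full.contains fr || B_suffix.any (fun sc => isUnder fr sc) then PySem.Set.add acc fr
      else acc) [])

def entriesOf (outSuf outFull : List String) : List (String × String) :=
  outSuf.map (fun s => ("suffix", s)) ++ outFull.map (fun e => ("full", e))

theorem intersect_pair_eq (a b c d : List String) :
    intersect_pair a b c d
      = (canonSet (optimize (entriesOf (outSufA a c) (outFullA a b c d))).1,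
         canonSet (optimize (entriesOf (outSufA a c) (outFullA a b c d))).2) := rfl

theorem optimize_eq (entries : List (String × String)) :
    optimize entries = collect (prune (entries.foldl insStep emptyTrie) false) [] ([], []) := rfl

-- the semantic predicates shared by both characterizations
def OutSufP (As Bs : List String) (x : String) : Prop :=
  (x ∈ As ∧ ∃ sc ∈ Bs, isUnder x sc = true) ∨ (x ∈ Bs ∧ ∃ sr ∈ As, isUnder x sr = true)

def OutFullP (A_suffix A_full B_suffix B_full : List String) (x : String) : Prop :=
  (x ∈ A_full ∧ (x ∈ B_full ∨ ∃ sc ∈ B_suffix, isUnder x sc = true))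
    ∨ (x ∈ B_full ∧ (x ∈ A_full ∨ ∃ sr ∈ A_suffix, isUnder x sr = true))

def ProperAnc (y x : String) : Prop :=
  ∃ k, 0 < k ∧ k < (splitDot x).length ∧ splitDot y = (splitDot x).drop k

theorem mem_innerFold (Bs : List String) (sr : String) : ∀ (acc : List String) (x : String),
    x ∈ Bs.foldl (fun acc sc =>
        if isUnder sr sc then PySem.Set.add acc sr
        else if isUnder sc sr then PySem.Set.add acc sc else acc) acc
      ↔ x ∈ acc ∨ (x = sr ∧ ∃ sc ∈ Bs, isUnder sr sc = true)
          ∨ (∃ sc ∈ Bs, isUnder sr sc = false ∧ isUnder sc sr = true ∧ x = sc) := by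
  induction Bs with
  | nil => simp
  | cons bb rest ih =>
    intro acc x
    rw [List.foldl_cons]
    by_cases h1 : isUnder sr bb = true
    · rw [if_pos h1, ih]
      simp only [PySem.Set.mem_add, List.mem_cons]
      aesop
    · have h1' : isUnder sr bb = false := by simpa using h1
      rw [if_neg (by simp [h1'])]
      by_cases h2 : isUnder bb sr = true
      · rw [if_pos h2, ih]
        simp only [PySem.Set.mem_add, List.mem_cons]
        aesop
      · have h2' : isUnder bb sr = false := by simpa using h2
        rw [if_neg (by simp [h2']), ih]
        simp only [List.mem_cons]
        aesop

theorem mem_outerFold (As Bs : List String) : ∀ (acc : List String) (x : String),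
    x ∈ As.foldl (fun acc sr => Bs.foldl (fun acc sc =>
        if isUnder sr sc then PySem.Set.add acc sr
        else if isUnder sc sr then PySem.Set.add acc sc else acc) acc) acc
      ↔ x ∈ acc ∨ ∃ sr ∈ As, ((x = sr ∧ ∃ sc ∈ Bs, isUnder sr sc = true)
          ∨ (∃ sc ∈ Bs, isUnder sr sc = false ∧ isUnder sc sr = true ∧ x = sc)) := by
  induction As with
  | nil => simp
  | cons aa rest ih =>
    intro acc x
    rw [List.foldl_cons, ih, mem_innerFold]
    simp only [List.mem_cons]
    constructor
    · rintro ((hin | hsr | hsc) | ⟨sr, hsr', hd⟩)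
      · exact Or.inl hin
      · exact Or.inr ⟨aa, Or.inl rfl, Or.inl hsr⟩
      · exact Or.inr ⟨aa, Or.inl rfl, Or.inr hsc⟩
      · exact Or.inr ⟨sr, Or.inr hsr', hd⟩
    · rintro (hin | ⟨sr, (rfl | hsr'), hd⟩)
      · exact Or.inl (Or.inl hin)
      · rcases hd with hd | hd
        · exact Or.inl (Or.inr (Or.inl hd))
        · exact Or.inl (Or.inr (Or.inr hd))
      · exact Or.inr ⟨sr, hsr', hd⟩

theorem rawSuf_iff_OutSufP (As Bs : List String) (x : String) :
    (∃ sr ∈ As, ((x = sr ∧ ∃ sc ∈ Bs, isUnder sr sc = true)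
        ∨ (∃ sc ∈ Bs, isUnder sr sc = false ∧ isUnder sc sr = true ∧ x = sc)))
      ↔ OutSufP As Bs x := by
  constructor
  · rintro ⟨sr, hsr, ⟨rfl, sc, hsc, hu⟩ | ⟨sc, hsc, hu1, hu2, rfl⟩⟩
    · exact Or.inl ⟨hsr, sc, hsc, hu⟩
    · exact Or.inr ⟨hsc, sr, hsr, hu2⟩
  · rintro (⟨hx, c, hc, hu⟩ | ⟨hx, r, hr, hu⟩)
    · exact ⟨x, hx, Or.inl ⟨rfl, c, hc, hu⟩⟩
    · by_cases hrx : isUnder r x = true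
      · have : r = x := isUnder_antisymm hrx hu
        subst this
        exact ⟨r, hr, Or.inl ⟨rfl, r, hx, isUnder_refl r⟩⟩
      · exact ⟨r, hr, Or.inr ⟨x, hx, by simpa using hrx, hu, rfl⟩⟩

theorem mem_outSufA (a c : List String) (x : String) :
    x ∈ outSufA a c ↔ OutSufP a c x := by
  unfold outSufA
  by_cases h : a.length ≤ c.length
  · rw [if_pos h]
    rw [show ((a, c).1 : List String) = a from rfl, show ((a, c).2 : List String) = c from rfl]
    rw [mem_outerFold, rawSuf_iff_OutSufP]
    simp
  · rw [if_neg h]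
    rw [show ((c, a).1 : List String) = c from rfl, show ((c, a).2 : List String) = a from rfl]
    rw [mem_outerFold, rawSuf_iff_OutSufP]
    simp only [List.not_mem_nil, false_or]
    unfold OutSufP
    exact or_comm

theorem mem_outFullA (a b c d : List String) (x : String) :
    x ∈ outFullA a b c d ↔ OutFullP a b c d x := by
  unfold outFullA
  rw [PySem.List.foldl_if_eq_foldl_filter
        (p := fun fc => b.contains fc || a.any (fun sr => isUnder fc sr))
        (f := fun acc e => PySem.Set.add acc e),
      PySem.List.foldl_if_eq_foldl_filter
        (p := fun fr => d.contains fr || c.any (fun sc => isUnder fr sc))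
        (f := fun acc e => PySem.Set.add acc e)]
  rw [show (fun (acc : List String) (e : String) => PySem.Set.add acc e)
      = (fun (s : PySem.Set String) b => s.add (id b)) from rfl]
  rw [PySem.Set.mem_foldl_add, PySem.Set.mem_foldl_add]
  unfold OutFullP
  simp only [List.not_mem_nil, false_or, List.mem_filter, id_eq,
    Bool.or_eq_true, List.contains_iff_mem, List.any_eq_true]
  constructor
  · rintro (⟨bb, ⟨hb, hcond⟩, rfl⟩ | ⟨bb, ⟨hb, hcond⟩, rfl⟩)
    · exact Or.inl ⟨hb, hcond⟩
    · exact Or.inr ⟨hb, hcond⟩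
  · rintro (⟨hb, hcond⟩ | ⟨hb, hcond⟩)
    · exact Or.inl ⟨x, ⟨hb, hcond⟩, rfl⟩
    · exact Or.inr ⟨x, ⟨hb, hcond⟩, rfl⟩


-- ---------- B-side and optimize characterizations ----------

def outSufB (A_suffix B_suffix : List String) : List String :=
  PySem.Set.union
    (PySem.Set.ofList (A_suffix.filter (fun s => s != "" && hitsB s B_suffix)))
    (B_suffix.filter (fun s => s != "" && hitsB s A_suffix))

def outFullB (A_suffix A_full B_suffix B_full : List String) : List String :=
  PySem.Set.union
    (PySem.Set.ofList (A_full.filter (fun f => f != "" && (B_full.contains f || hitsB f B_suffix))))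
    (B_full.filter (fun f => f != "" && (A_full.contains f || hitsB f A_suffix)))

theorem intersect_pair_alt_eq (a b c d : List String) :
    intersect_pair_alt a b c d
      = (canonSet ((outSufB a c).filter
            (fun s => !((ancestorsB s).drop 1).any (fun t => (outSufB a c).contains t))),
         canonSet ((outFullB a b c d).filter
            (fun f => !(outSufB a c).contains f
              && !((ancestorsB f).drop 1).any (fun t => (outSufB a c).contains t)))) := rfl

theorem mem_ancestorsB (a y : String) :
    y ∈ ancestorsB a ↔ ∃ k, k < (splitDot a).length ∧ y = joinDot ((splitDot a).drop k) := by
  simp [ancestorsB, joinDot, List.mem_map, List.mem_range, eq_comm]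

theorem mem_ancestorsB_drop1 (a y : String) :
    y ∈ (ancestorsB a).drop 1
      ↔ ∃ k, 0 < k ∧ k < (splitDot a).length ∧ y = joinDot ((splitDot a).drop k) := by
  unfold ancestorsB
  rcases e : (splitDot a).length with _ | m
  · simp [e]
  · rw [← List.map_drop, e, List.range_succ_eq_map]
    simp only [List.drop_succ_cons, List.drop_zero, List.mem_map, List.mem_map, List.mem_range]
    constructor
    · rintro ⟨j, ⟨jj, hjj, rfl⟩, rfl⟩
      exact ⟨jj + 1, by omega, by omega, by simp [joinDot]⟩
    · rintro ⟨k, hk0, hkn, rfl⟩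
      rcases Nat.exists_eq_add_of_lt hk0 with ⟨jj, rfl⟩
      exact ⟨jj + 1, ⟨jj, by omega, rfl⟩, by simp [joinDot]⟩

theorem isUnder_iff_mem (a b : String) : isUnder a b = true ↔ b ∈ ancestorsB a := by
  rw [isUnder_iff, mem_ancestorsB]

theorem hitsB_iff (s : String) (other : List String) :
    hitsB s other = true ↔ ∃ c ∈ other, isUnder s c = true := by
  unfold hitsB
  simp only [List.any_eq_true, List.contains_iff_mem]
  constructor
  · rintro ⟨a, ha, hmem⟩
    exact ⟨a, hmem, (isUnder_iff_mem s a).mpr ha⟩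
  · rintro ⟨c, hc, hu⟩
    exact ⟨c, (isUnder_iff_mem s c).mp hu, hc⟩

theorem mem_outSufB (a c : List String) (x : String) :
    x ∈ outSufB a c ↔ OutSufP a c x ∧ x ≠ "" := by
  unfold outSufB OutSufP
  rw [PySem.Set.mem_union, PySem.Set.mem_ofList]
  simp only [List.mem_filter, Bool.and_eq_true, bne_iff_ne, ne_eq, hitsB_iff]
  aesop

theorem mem_outFullB (a b c d : List String) (x : String) :
    x ∈ outFullB a b c d ↔ OutFullP a b c d x ∧ x ≠ "" := by
  unfold outFullB OutFullP
  rw [PySem.Set.mem_union, PySem.Set.mem_ofList]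
  simp only [List.mem_filter, Bool.and_eq_true, bne_iff_ne, ne_eq, hitsB_iff,
    Bool.or_eq_true, List.contains_iff_mem]
  aesop

theorem properAnc_iff_join (y x : String) :
    ProperAnc y x ↔ ∃ k, 0 < k ∧ k < (splitDot x).length ∧ y = joinDot ((splitDot x).drop k) := by
  unfold ProperAnc
  constructor
  · rintro ⟨k, hk0, hkn, hsp⟩
    refine ⟨k, hk0, hkn, ?_⟩
    rw [← joinDot_splitDot y, hsp]
  · rintro ⟨k, hk0, hkn, rfl⟩
    refine ⟨k, hk0, hkn, ?_⟩
    apply splitDot_joinDot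
    · intro hnil
      have : ((splitDot x).drop k).length = 0 := by rw [hnil]; rfl
      rw [List.length_drop] at this
      omega
    · intro t ht
      exact dotfree_splitDot x t (List.mem_of_mem_drop ht)

theorem baseOf_labelsRev (b : String) (hb : b ≠ "") : baseOf (labelsRev b) = b := by
  unfold baseOf labelsRev
  rw [if_pos hb]
  have hne : (splitDot b).reverse ≠ [] := by
    simpa using splitDot_ne_nil b
  rw [if_pos hne, List.reverse_reverse]
  exact joinDot_splitDot b

theorem labelsRev_inj {y b : String} (hy : y ≠ "") (hb : b ≠ "") :
    labelsRev y = labelsRev b → y = b := by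
  intro h
  rw [← baseOf_labelsRev y hy, ← baseOf_labelsRev b hb, h]

theorem flagS_rootOf (oS oF : List String) (q : List String) :
    flagS ((entriesOf oS oF).foldl insStep emptyTrie) q = true
      ↔ ∃ b ∈ oS, b ≠ "" ∧ q = labelsRev b := by
  rw [flagS_foldl, flagS_empty]
  simp [entriesOf, List.any_append, List.any_map, Function.comp_def, List.any_eq_true,
    bne_iff_ne, and_assoc]

theorem flagF_rootOf (oS oF : List String) (q : List String) :
    flagF ((entriesOf oS oF).foldl insStep emptyTrie) q = true
      ↔ ∃ b ∈ oF, b ≠ "" ∧ q = labelsRev b := by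
  rw [flagF_foldl, flagF_empty]
  simp [entriesOf, List.any_append, List.any_map, Function.comp_def, List.any_eq_true,
    bne_iff_ne, and_assoc]

theorem strictAbove_root_iff (oS oF : List String) (x : String) (hx : x ≠ "") :
    strictAbove ((entriesOf oS oF).foldl insStep emptyTrie) (labelsRev x) = true
      ↔ ∃ y, (y ∈ oS ∧ y ≠ "") ∧ ProperAnc y x := by
  have hlr : labelsRev x = (splitDot x).reverse := by simp [labelsRev, hx]
  have hlen : (labelsRev x).length = (splitDot x).length := by simp [hlr]
  rw [strictAbove_iff]
  constructor
  · rintro ⟨k, hk, hf⟩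
    rcases (flagS_rootOf oS oF _).mp hf with ⟨y, hy, hy0, heq⟩
    have hyr : labelsRev y = (splitDot y).reverse := by simp [labelsRev, hy0]
    rw [hlr, List.take_reverse, hyr] at heq
    have hsp : (splitDot x).drop ((splitDot x).length - k) = splitDot y :=
      List.reverse_inj.mp heq
    have hk0 : k ≠ 0 := by
      rintro rfl
      have := splitDot_ne_nil y
      rw [Nat.sub_zero, List.drop_length] at hsp
      exact this hsp.symm
    rw [hlen] at hk
    exact ⟨y, ⟨hy, hy0⟩, (splitDot x).length - k, by omega, by omega, hsp.symm⟩
  · rintro ⟨y, ⟨hy, hy0⟩, j, hj0, hjn, hsp⟩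
    refine ⟨(splitDot x).length - j, by omega, ?_⟩
    apply (flagS_rootOf oS oF _).mpr
    refine ⟨y, hy, hy0, ?_⟩
    have hyr : labelsRev y = (splitDot y).reverse := by simp [labelsRev, hy0]
    rw [hlr, List.take_reverse, hyr, hsp]
    congr 2
    omega

theorem flagS_root_self_iff (oS oF : List String) (x : String) (hx : x ≠ "") :
    flagS ((entriesOf oS oF).foldl insStep emptyTrie) (labelsRev x) = true ↔ x ∈ oS := by
  rw [flagS_rootOf]
  constructor
  · rintro ⟨y, hy, hy0, heq⟩
    rwa [labelsRev_inj hx hy0 heq]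
  · intro h
    exact ⟨x, h, hx, rfl⟩

theorem wf_root (entries : List (String × String)) : wfT (entries.foldl insStep emptyTrie) :=
  wf_foldl entries emptyTrie wfT_empty

theorem memA_fst (oS oF : List String) (x : String) :
    x ∈ (optimize (entriesOf oS oF)).1
      ↔ (x ∈ oS ∧ x ≠ "") ∧ ¬ ∃ y, (y ∈ oS ∧ y ≠ "") ∧ ProperAnc y x := by
  rw [optimize_eq]
  rw [mem_collect_fst _ [] ([], []) x (wf_prune _ false (wf_root _))]
  simp only [List.not_mem_nil, false_or, List.nil_append]
  constructor
  · rintro ⟨q, hf, hb, rfl⟩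
    rw [flagS_prune] at hf
    simp only [Bool.not_false, Bool.true_and, Bool.and_eq_true, Bool.not_eq_true'] at hf
    rcases hf with ⟨hfS, hsa⟩
    rcases (flagS_rootOf oS oF q).mp hfS with ⟨y, hy, hy0, rfl⟩
    rw [baseOf_labelsRev y hy0] at *
    refine ⟨⟨hy, hy0⟩, ?_⟩
    intro hanc
    rw [(strictAbove_root_iff oS oF y hy0).mpr hanc] at hsa
    simp at hsa
  · rintro ⟨⟨hin, hx0⟩, hnanc⟩
    refine ⟨labelsRev x, ?_, by rwa [baseOf_labelsRev x hx0], (baseOf_labelsRev x hx0).symm⟩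
    rw [flagS_prune]
    simp only [Bool.not_false, Bool.true_and, Bool.and_eq_true, Bool.not_eq_true']
    refine ⟨(flagS_root_self_iff oS oF x hx0).mpr hin, ?_⟩
    rcases e : strictAbove ((entriesOf oS oF).foldl insStep emptyTrie) (labelsRev x) with _ | _
    · rfl
    · exact absurd ((strictAbove_root_iff oS oF x hx0).mp e) hnanc

theorem memA_snd (oS oF : List String) (x : String) :
    x ∈ (optimize (entriesOf oS oF)).2
      ↔ ((x ∈ oF ∧ x ≠ "") ∧ x ∉ oS) ∧ ¬ ∃ y, (y ∈ oS ∧ y ≠ "") ∧ ProperAnc y x := by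
  rw [optimize_eq]
  rw [mem_collect_snd _ [] ([], []) x (wf_prune _ false (wf_root _))]
  simp only [List.not_mem_nil, false_or, List.nil_append]
  constructor
  · rintro ⟨q, hf, hb, rfl⟩
    rw [flagF_prune] at hf
    simp only [Bool.not_false, Bool.true_and, Bool.and_eq_true, Bool.not_eq_true'] at hf
    rcases hf with ⟨⟨hfF, hnS⟩, hsa⟩
    rcases (flagF_rootOf oS oF q).mp hfF with ⟨y, hy, hy0, rfl⟩
    rw [baseOf_labelsRev y hy0] at *
    refine ⟨⟨⟨hy, hy0⟩, ?_⟩, ?_⟩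
    · intro hmem
      rw [(flagS_root_self_iff oS oF y hy0).mpr hmem] at hnS
      simp at hnS
    · intro hanc
      rw [(strictAbove_root_iff oS oF y hy0).mpr hanc] at hsa
      simp at hsa
  · rintro ⟨⟨⟨hin, hx0⟩, hns⟩, hnanc⟩
    refine ⟨labelsRev x, ?_, by rwa [baseOf_labelsRev x hx0], (baseOf_labelsRev x hx0).symm⟩
    rw [flagF_prune]
    simp only [Bool.not_false, Bool.true_and, Bool.and_eq_true, Bool.not_eq_true']
    refine ⟨⟨(flagF_rootOf oS oF _).mpr ⟨x, hin, hx0, rfl⟩, ?_⟩, ?_⟩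
    · rcases e : flagS ((entriesOf oS oF).foldl insStep emptyTrie) (labelsRev x) with _ | _
      · rfl
      · exact absurd ((flagS_root_self_iff oS oF x hx0).mp e) hns
    · rcases e : strictAbove ((entriesOf oS oF).foldl insStep emptyTrie) (labelsRev x) with _ | _
      · rfl
      · exact absurd ((strictAbove_root_iff oS oF x hx0).mp e) hnanc

-- B-side final filters
theorem memB_fst (a c : List String) (x : String) :
    x ∈ (outSufB a c).filter
        (fun s => !((ancestorsB s).drop 1).any (fun t => (outSufB a c).contains t))
      ↔ (OutSufP a c x ∧ x ≠ "") ∧ ¬ ∃ y, (OutSufP a c y ∧ y ≠ "") ∧ ProperAnc y x := by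
  rw [List.mem_filter]
  constructor
  · rintro ⟨hmem, hfilt⟩
    rw [mem_outSufB] at hmem
    refine ⟨hmem, ?_⟩
    rintro ⟨y, hy, hanc⟩
    have hyd : y ∈ (ancestorsB x).drop 1 :=
      (mem_ancestorsB_drop1 x y).mpr ((properAnc_iff_join y x).mp hanc)
    have hcy : (outSufB a c).contains y = true := by
      rw [List.contains_iff_mem, mem_outSufB]; exact hy
    have hany : ((ancestorsB x).drop 1).any (fun t => (outSufB a c).contains t) = true :=
      List.any_eq_true.mpr ⟨y, hyd, hcy⟩
    rw [hany] at hfilt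
    simp at hfilt
  · rintro ⟨hx, hno⟩
    refine ⟨(mem_outSufB a c x).mpr hx, ?_⟩
    rw [Bool.not_eq_eq_eq_not, Bool.not_true, List.any_eq_false]
    intro t ht
    rw [List.contains_iff_mem, mem_outSufB]
    intro hmem
    exact hno ⟨t, hmem, (properAnc_iff_join t x).mpr ((mem_ancestorsB_drop1 x t).mp ht)⟩

theorem memB_snd (a b c d : List String) (x : String) :
    x ∈ (outFullB a b c d).filter
        (fun f => !(outSufB a c).contains f
          && !((ancestorsB f).drop 1).any (fun t => (outSufB a c).contains t))
      ↔ ((OutFullP a b c d x ∧ x ≠ "") ∧ ¬ (OutSufP a c x ∧ x ≠ ""))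
          ∧ ¬ ∃ y, (OutSufP a c y ∧ y ≠ "") ∧ ProperAnc y x := by
  rw [List.mem_filter]
  constructor
  · rintro ⟨hmem, hfilt⟩
    rw [Bool.and_eq_true] at hfilt
    rcases hfilt with ⟨hns, hnanc⟩
    rw [mem_outFullB] at hmem
    refine ⟨⟨hmem, ?_⟩, ?_⟩
    · intro hsuf
      have : (outSufB a c).contains x = true := by
        rw [List.contains_iff_mem, mem_outSufB]; exact hsuf
      rw [this] at hns
      simp at hns
    · rintro ⟨y, hy, hanc⟩
      have hyd : y ∈ (ancestorsB x).drop 1 :=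
        (mem_ancestorsB_drop1 x y).mpr ((properAnc_iff_join y x).mp hanc)
      have hcy : (outSufB a c).contains y = true := by
        rw [List.contains_iff_mem, mem_outSufB]; exact hy
      have hany : ((ancestorsB x).drop 1).any (fun t => (outSufB a c).contains t) = true :=
        List.any_eq_true.mpr ⟨y, hyd, hcy⟩
      rw [hany] at hnanc
      simp at hnanc
  · rintro ⟨⟨hx, hns⟩, hno⟩
    refine ⟨(mem_outFullB a b c d x).mpr hx, ?_⟩
    rw [Bool.and_eq_true]
    constructor
    · rw [Bool.not_eq_eq_eq_not, Bool.not_true]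
      rcases e : (outSufB a c).contains x with _ | _
      · rfl
      · rw [List.contains_iff_mem, mem_outSufB] at e
        exact absurd e hns
    · rw [Bool.not_eq_eq_eq_not, Bool.not_true, List.any_eq_false]
      intro t ht
      rw [List.contains_iff_mem, mem_outSufB]
      intro hmem
      exact hno ⟨t, hmem, (properAnc_iff_join t x).mpr ((mem_ancestorsB_drop1 x t).mp ht)⟩

-- nodup facts and the canonical-representation congruence
theorem nodup_optimize (entries : List (String × String)) :
    (optimize entries).1.Nodup ∧ (optimize entries).2.Nodup := by
  rw [optimize_eq]
  exact nodup_collect _ [] ([], []) List.nodup_nil List.nodup_nil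

theorem nodup_outSufB (a c : List String) : (outSufB a c).Nodup :=
  PySem.Set.nodup_union _ _ (PySem.Set.nodup_ofList _)

theorem nodup_outFullB (a b c d : List String) : (outFullB a b c d).Nodup :=
  PySem.Set.nodup_union _ _ (PySem.Set.nodup_ofList _)

theorem canonSet_eq_of_mem_iff (l1 l2 : List String) (h1 : l1.Nodup) (h2 : l2.Nodup)
    (h : ∀ x, x ∈ l1 ↔ x ∈ l2) : canonSet l1 = canonSet l2 := by
  unfold canonSet
  exact (PySem.List.sorted_id_eq_sorted_id_iff_perm l1 l2).mpr
    ((List.perm_ext_iff_of_nodup h1 h2).mpr h)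

theorem intersect_eq_alt (a b c d : List String) :
    intersect_pair a b c d = intersect_pair_alt a b c d := by
  rw [intersect_pair_eq, intersect_pair_alt_eq]
  have hS : ∀ x, x ∈ (optimize (entriesOf (outSufA a c) (outFullA a b c d))).1
      ↔ x ∈ (outSufB a c).filter
          (fun s => !((ancestorsB s).drop 1).any (fun t => (outSufB a c).contains t)) := by
    intro x
    rw [memA_fst, memB_fst]
    constructor
    · rintro ⟨⟨hin, hx0⟩, hnanc⟩
      refine ⟨⟨(mem_outSufA a c x).mp hin, hx0⟩, ?_⟩
      rintro ⟨y, ⟨hy, hy0⟩, hanc⟩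
      exact hnanc ⟨y, ⟨(mem_outSufA a c y).mpr hy, hy0⟩, hanc⟩
    · rintro ⟨⟨hin, hx0⟩, hnanc⟩
      refine ⟨⟨(mem_outSufA a c x).mpr hin, hx0⟩, ?_⟩
      rintro ⟨y, ⟨hy, hy0⟩, hanc⟩
      exact hnanc ⟨y, ⟨(mem_outSufA a c y).mp hy, hy0⟩, hanc⟩
  have hE : ∀ x, x ∈ (optimize (entriesOf (outSufA a c) (outFullA a b c d))).2
      ↔ x ∈ (outFullB a b c d).filter
          (fun f => !(outSufB a c).contains f
            && !((ancestorsB f).drop 1).any (fun t => (outSufB a c).contains t)) := by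
    intro x
    rw [memA_snd, memB_snd]
    constructor
    · rintro ⟨⟨⟨hin, hx0⟩, hns⟩, hnanc⟩
      refine ⟨⟨⟨(mem_outFullA a b c d x).mp hin, hx0⟩, ?_⟩, ?_⟩
      · rintro ⟨hsuf, -⟩
        exact hns ((mem_outSufA a c x).mpr hsuf)
      · rintro ⟨y, ⟨hy, hy0⟩, hanc⟩
        exact hnanc ⟨y, ⟨(mem_outSufA a c y).mpr hy, hy0⟩, hanc⟩
    · rintro ⟨⟨⟨hin, hx0⟩, hns⟩, hnanc⟩
      refine ⟨⟨⟨(mem_outFullA a b c d x).mpr hin, hx0⟩, ?_⟩, ?_⟩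
      · intro hmem
        exact hns ⟨(mem_outSufA a c x).mp hmem, hx0⟩
      · rintro ⟨y, ⟨hy, hy0⟩, hanc⟩
        exact hnanc ⟨y, ⟨(mem_outSufA a c y).mp hy, hy0⟩, hanc⟩
  have h1 := canonSet_eq_of_mem_iff _ _ (nodup_optimize _).1
    ((nodup_outSufB a c).filter _) hS
  have h2 := canonSet_eq_of_mem_iff _ _ (nodup_optimize _).2
    ((nodup_outFullB a b c d).filter _) hE
  rw [h1, h2]

-- ===== VERDICT (by name: the statement is the Claim_ definition above) =====
theorem intersect_pair_spec : Claim_equal_intersect_pair := by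
  intro a b c d _
  unfold Spec_intersect_pair
  exact intersect_eq_alt a b c d
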